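-- pv_equiv track=rewrite | github.com/joaolscosta/ist | FProg/codelioko/ficha n4/ex2_f4.py | reconhece
-- ===== SOURCE A (Python) =====
-- def reconhece(cadeia):
--     i = 0
--     while i < len(cadeia) and cadeia[i] in "ABCDEFGHIJKLMNOPQRSTUVWXYZ":
--         i += 1
--     if i == len(cadeia):
--         return False
--     while i < len(cadeia) and cadeia[i] in "1234567890":
--         i += 1
--     return True
-- ===== SOURCE B (Python) =====
-- LETTERS = set("ABCDEFGHIJKLMNOPQRSTUVWXYZ")
--
-- def reconhece(cadeia):
--     # The string is rejected exactly when every character is an uppercase letter,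
--     # i.e. when its character set is a subset of the uppercase alphabet.
--     return not set(cadeia).issubset(LETTERS)
-- ===== Notes on version B (the rewrite author's own statement) =====
-- stated objective: alternative
-- what changed: A's second digit loop is dead and its first index loop only tests whether the whole string is uppercase letters; B builds the set of distinct characters once and answers by a set-inclusion test against the uppercase alphabet, with no index scan or short-circuit loop.
import Mathlib
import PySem

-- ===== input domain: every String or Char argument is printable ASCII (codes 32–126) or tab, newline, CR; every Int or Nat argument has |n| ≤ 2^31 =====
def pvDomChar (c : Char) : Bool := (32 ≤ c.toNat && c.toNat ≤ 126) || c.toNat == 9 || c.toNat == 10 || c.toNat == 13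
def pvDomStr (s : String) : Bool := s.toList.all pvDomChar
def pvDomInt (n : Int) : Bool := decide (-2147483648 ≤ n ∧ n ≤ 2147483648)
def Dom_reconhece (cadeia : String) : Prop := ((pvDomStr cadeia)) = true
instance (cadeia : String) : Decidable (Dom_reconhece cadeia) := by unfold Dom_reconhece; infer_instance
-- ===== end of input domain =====

-- B replaces A's two index-driven while loops (the second of which is dead) by building the
-- set of distinct characters and testing inclusion in the uppercase alphabet. Objective: alternative.


-- ===== PORT A =====
def pvLettersA : List Char := "ABCDEFGHIJKLMNOPQRSTUVWXYZ".toList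
def pvDigitsA : List Char := "1234567890".toList

-- first while loop of A; indexing is guarded by i < length, so getD never hits its default
def reconheceLoop1 (cs : List Char) (i : Nat) : Nat :=
  if i < cs.length ∧ pvLettersA.contains (cs.getD i ' ') then
    reconheceLoop1 cs (i + 1)
  else i
termination_by cs.length - i

-- second while loop of A (its result is unused by A, kept for faithfulness)
def reconheceLoop2 (cs : List Char) (i : Nat) : Nat :=
  if i < cs.length ∧ pvDigitsA.contains (cs.getD i ' ') then
    reconheceLoop2 cs (i + 1)
  else i
termination_by cs.length - i

def reconhece (cadeia : String) : Bool :=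
  let cs := cadeia.toList
  let i := reconheceLoop1 cs 0
  if i = cs.length then false
  else
    let _ := reconheceLoop2 cs i
    true

-- ===== PORT B =====
def pvLettersSetB : PySem.Set Char := PySem.Set.ofList "ABCDEFGHIJKLMNOPQRSTUVWXYZ".toList

def reconhece_alt (cadeia : String) : Bool :=
  !(PySem.Set.issubset (PySem.Set.ofList cadeia.toList) pvLettersSetB)

-- ===== PRECONDITION & SPEC =====
def Spec_reconhece (cadeia : String) (out : Bool) : Prop := out = reconhece_alt cadeia
instance (cadeia : String) (out : Bool) : Decidable (Spec_reconhece cadeia out) := by unfold Spec_reconhece; infer_instance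

-- ===== CLAIM (what is proved, stated in full; the proofs are below) =====
def Claim_equal_reconhece : Prop := ∀ (cadeia : String), Dom_reconhece cadeia → Spec_reconhece cadeia (reconhece cadeia)

-- ===== LEMMAS AND PROOFS =====

lemma reconheceLoop1_spec (cs : List Char) (i : Nat) (h : i ≤ cs.length) :
    (if reconheceLoop1 cs i = cs.length then false else true)
      = (cs.drop i).any (fun c => !(pvLettersA.contains c)) := by
  generalize hn : cs.length - i = n
  induction n generalizing i with
  | zero =>
    have heq : i = cs.length := by omega
    rw [reconheceLoop1]
    simp [heq]
  | succ n ih =>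
    have hlt : i < cs.length := by omega
    have hdrop : cs.drop i = cs[i] :: cs.drop (i + 1) := List.drop_eq_getElem_cons hlt
    have hget : cs.getD i ' ' = cs[i] := List.getD_eq_getElem cs ' ' hlt
    by_cases hc : pvLettersA.contains (cs.getD i ' ')
    · have hstep : reconheceLoop1 cs i = reconheceLoop1 cs (i + 1) := by
        rw [reconheceLoop1]; exact if_pos ⟨hlt, hc⟩
      have hrec := ih (i + 1) hlt (by omega)
      rw [hstep, hrec, hdrop, List.any_cons]
      rw [hget] at hc
      have hmem : cs[i] ∈ pvLettersA := by simpa using hc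
      simp [hmem]
    · have hstep : reconheceLoop1 cs i = i := by
        rw [reconheceLoop1]; exact if_neg (fun hco => hc hco.2)
      have hne : i ≠ cs.length := Nat.ne_of_lt hlt
      rw [hstep, if_neg hne, hdrop, List.any_cons]
      rw [hget] at hc
      have hmem : cs[i] ∉ pvLettersA := by simpa using hc
      simp [hmem]

-- B's subset test agrees with "some character is not an uppercase letter", negated
lemma alt_eq_any (cadeia : String) :
    reconhece_alt cadeia = cadeia.toList.any (fun c => !(pvLettersA.contains c)) := by
  unfold reconhece_alt
  have key : PySem.Set.issubset (PySem.Set.ofList cadeia.toList) pvLettersSetB = true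
      ↔ ∀ c ∈ cadeia.toList, c ∈ pvLettersA := by
    rw [PySem.Set.issubset_iff]
    constructor
    · intro h c hc
      have := h c (by simp [PySem.Set.mem_ofList, hc])
      simpa [pvLettersSetB, PySem.Set.mem_ofList, pvLettersA] using this
    · intro h c hc
      have hc' : c ∈ cadeia.toList := by simpa [PySem.Set.mem_ofList] using hc
      simpa [pvLettersSetB, PySem.Set.mem_ofList, pvLettersA] using h c hc'
  by_cases hall : ∀ c ∈ cadeia.toList, c ∈ pvLettersA
  · rw [key.2 hall, Bool.not_true]
    symm
    rw [List.any_eq_false]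
    intro c hc
    simp [hall c hc]
  · have hsub : PySem.Set.issubset (PySem.Set.ofList cadeia.toList) pvLettersSetB = false := by
      rw [← Bool.not_eq_true, key]
      exact hall
    rw [hsub, Bool.not_false]
    symm
    rw [List.any_eq_true]
    push Not at hall
    obtain ⟨c, hc, hnc⟩ := hall
    exact ⟨c, hc, by simpa using hnc⟩

-- ===== VERDICT (by name: the statement is the Claim_ definition above) =====
theorem reconhece_spec : Claim_equal_reconhece := by
  intro cadeia _
  unfold Spec_reconhece reconhece
  have h := reconheceLoop1_spec cadeia.toList 0 (Nat.zero_le _)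
  simp only [List.drop_zero] at h
  rw [alt_eq_any]
  dsimp only
  exact h
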